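-- pv_equiv track=rewrite | github.com/mellery/advent_of_code | 2015/day1.py | part1
-- ===== SOURCE A (Python) =====
-- def part1(input_str: str) -> int:
--     """Legacy function for part 1."""
--     floor = 0
--     for char in input_str:
--         if char == "(":
--             floor += 1
--         elif char == ")":
--             floor -= 1
--     return floor
-- ===== SOURCE B (Python) =====
-- def part1(input_str: str) -> int:
--     return input_str.count("(") - input_str.count(")")
-- ===== Notes on version B (the rewrite author's own statement) =====
-- stated objective: idiomatic
-- what changed: Replaces the branching accumulator loop with two independent str.count scans whose difference is the final floor.
import Mathlib
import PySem

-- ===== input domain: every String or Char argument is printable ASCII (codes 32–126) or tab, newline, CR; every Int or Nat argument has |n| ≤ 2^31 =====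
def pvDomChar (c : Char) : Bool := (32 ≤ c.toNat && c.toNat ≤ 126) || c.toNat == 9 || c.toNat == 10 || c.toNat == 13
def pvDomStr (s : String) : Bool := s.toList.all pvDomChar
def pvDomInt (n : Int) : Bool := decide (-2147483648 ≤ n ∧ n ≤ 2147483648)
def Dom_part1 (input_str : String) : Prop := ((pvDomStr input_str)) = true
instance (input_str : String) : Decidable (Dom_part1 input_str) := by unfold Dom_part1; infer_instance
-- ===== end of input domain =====

-- B replaces A's branching accumulator loop by two independent character counts subtracted (more idiomatic).

-- ===== PORT A =====
-- for char in input_str: if '(' then floor += 1 elif ')' then floor -= 1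
def part1 (input_str : String) : Int :=
  input_str.toList.foldl
    (fun floor char =>
      if char = '(' then floor + 1
      else if char = ')' then floor - 1
      else floor) 0

-- ===== PORT B =====
def part1_alt (input_str : String) : Int :=
  (PySem.Str.count input_str "(" : Int) - (PySem.Str.count input_str ")" : Int)

-- ===== PRECONDITION & SPEC =====
def Spec_part1 (input_str : String) (out : Int) : Prop := out = part1_alt input_str
instance (input_str : String) (out : Int) : Decidable (Spec_part1 input_str out) := by unfold Spec_part1; infer_instance

-- ===== CLAIM (what is proved, stated in full; the proofs are below) =====
def Claim_equal_part1 : Prop := ∀ (input_str : String), Dom_part1 input_str → Spec_part1 input_str (part1 input_str)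

-- ===== LEMMAS AND PROOFS =====

theorem count_go_single (c : Char) (t : List Char) (acc : Nat) :
    PySem.Chars.count.go [c] t.length t acc = acc + t.count c := by
  induction t generalizing acc with
  | nil => rfl
  | cons a t ih =>
    rw [show (a :: t).length = t.length + 1 from rfl]
    simp only [PySem.Chars.count.go]
    by_cases h : c = a
    · subst h; simp [List.isPrefixOf, ih]; omega
    · simp [List.isPrefixOf, Ne.symm h, ih, h]

theorem count_single (l : List Char) (c : Char) : PySem.Chars.count l [c] = l.count c := by
  simp [PySem.Chars.count, count_go_single]

theorem floor_loop (l : List Char) (a : Int) :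
    l.foldl (fun floor char =>
      if char = '(' then floor + 1
      else if char = ')' then floor - 1
      else floor) a = a + (l.count '(' : Int) - (l.count ')' : Int) := by
  induction l generalizing a with
  | nil => simp
  | cons x t ih =>
    simp only [List.foldl_cons, ih, List.count_cons]
    by_cases h1 : x = '('
    · simp [h1]; ring
    · by_cases h2 : x = ')'
      · simp [h2]; ring
      · simp [h1, h2]

-- ===== VERDICT (by name: the statement is the Claim_ definition above) =====
theorem part1_spec : Claim_equal_part1 := by
  intro s _
  unfold Spec_part1 part1 part1_alt
  rw [floor_loop]
  simp [PySem.Str.count, count_single]
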